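-- pv_equiv track=rewrite | github.com/jordangeorgiev/open_deep_research | src/open_deep_research/utils.py | supports_structured_output
-- ===== SOURCE A (Python) =====
-- def supports_structured_output(model_name: str) -> bool:
--     """Check if a model supports LangChain's with_structured_output() method.
--
--     Args:
--         model_name: The model identifier string
--
--     Returns:
--         True if the model supports structured output, False otherwise
--     """
--     model_str = str(model_name).lower()
--
--     # Models that support structured output
--     supported_providers = [
--         'openai:',
--         'anthropic:',
--         'google:',
--         'gemini:',
--     ]
--
--     # Ollama and other local models don't support structured output
--     unsupported_providers = [
--         'ollama:',
--         'together:',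
--         'groq:',  # Groq may support it, but being conservative
--     ]
--
--     # Check if it's an unsupported provider
--     for provider in unsupported_providers:
--         if model_str.startswith(provider):
--             return False
--
--     # Check if it's a supported provider
--     for provider in supported_providers:
--         if model_str.startswith(provider):
--             return True
--
--     # Default to False for unknown providers
--     return False
-- ===== SOURCE B (Python) =====
-- _SUPPORTED = ('openai', 'anthropic', 'google', 'gemini')
--
--
-- def supports_structured_output(model_name: str) -> bool:
--     """Check if a model supports LangChain's with_structured_output() method.
--
--     Parse the provider token (everything before the first ':') and test it
--     against the supported providers; any name without a colon, or with an
--     unknown or unsupported provider, yields False.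
--     """
--     provider, sep, _ = str(model_name).lower().partition(':')
--     return sep == ':' and provider in _SUPPORTED
-- ===== Notes on version B (the rewrite author's own statement) =====
-- stated objective: idiomatic
-- what changed: B replaces A's two sequential startswith-scan loops over seven prefix literals by a single partition at the first ':' plus one membership test of the provider token in the supported tuple (the unsupported list disappears: it is disjoint from the supported one and yields False anyway).
import Mathlib
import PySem

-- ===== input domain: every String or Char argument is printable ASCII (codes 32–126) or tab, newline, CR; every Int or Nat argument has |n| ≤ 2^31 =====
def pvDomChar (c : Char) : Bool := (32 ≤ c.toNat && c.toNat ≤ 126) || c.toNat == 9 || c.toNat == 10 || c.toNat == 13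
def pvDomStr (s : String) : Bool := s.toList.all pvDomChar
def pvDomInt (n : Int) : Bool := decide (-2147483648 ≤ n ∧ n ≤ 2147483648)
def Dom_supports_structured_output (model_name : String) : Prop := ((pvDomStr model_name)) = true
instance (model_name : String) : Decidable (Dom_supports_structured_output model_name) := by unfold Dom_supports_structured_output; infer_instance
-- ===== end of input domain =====

-- B replaces A's two startswith-scan loops by one partition at the first ':' plus a
-- single membership test of the provider token (idiomatic; same behaviour everywhere).

-- ===== PORT A =====
-- the 'for provider in …: if model_str.startswith(provider): return …' loop shape
def pvAnyStarts (model_str : String) : List String → Bool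
  | [] => false
  | p :: rest =>
      if PySem.Str.startswith model_str p then true else pvAnyStarts model_str rest

def supports_structured_output (model_name : String) : Bool :=
  let model_str := PySem.Str.lower model_name
  let supported_providers := ["openai:", "anthropic:", "google:", "gemini:"]
  let unsupported_providers := ["ollama:", "together:", "groq:"]
  if pvAnyStarts model_str unsupported_providers then false
  else if pvAnyStarts model_str supported_providers then true
  else false

-- ===== PORT B =====
def pvSupported : List (List Char) :=
  ["openai".toList, "anthropic".toList, "google".toList, "gemini".toList]

def supports_structured_output_alt (model_name : String) : Bool :=
  let s := (PySem.Str.lower model_name).toList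
  -- str.partition(':') ported by hand (exact: provider = the characters before the
  -- first ':'; sep = ":" iff ':' occurs in s, else sep = "")
  let provider := s.takeWhile (fun c => decide (c ≠ ':'))
  let hasColon := s.contains ':'
  hasColon && pvSupported.contains provider

-- ===== PRECONDITION & SPEC =====
def Spec_supports_structured_output (model_name : String) (out : Bool) : Prop := out = supports_structured_output_alt model_name
instance (model_name : String) (out : Bool) : Decidable (Spec_supports_structured_output model_name out) := by unfold Spec_supports_structured_output; infer_instance

-- ===== CLAIM (what is proved, stated in full; the proofs are below) =====
def Claim_equal_supports_structured_output : Prop := ∀ (model_name : String), Dom_supports_structured_output model_name → Spec_supports_structured_output model_name (supports_structured_output model_name)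

-- ===== LEMMAS AND PROOFS =====

-- A startswith check against "<provider>:" is exactly: a colon occurs, and the
-- characters before the first colon are <provider>.
lemma pv_sw_iff (ls p : List Char) (hp : ':' ∉ p) :
    PySem.Chars.startswith ls (p ++ [':']) = true ↔
      (':' ∈ ls ∧ ls.takeWhile (fun c => decide (c ≠ ':')) = p) := by
  rw [PySem.Chars.startswith_iff]
  constructor
  · rintro ⟨t, ht⟩
    subst ht
    refine ⟨by simp, ?_⟩
    induction p with
    | nil => simp
    | cons a as ih =>
      simp only [List.mem_cons, not_or] at hp
      have ha : ¬ a = ':' := fun h => hp.1 h.symm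
      have ih' := ih hp.2
      simp only [List.cons_append, List.takeWhile_cons]
      simp only [List.append_assoc, List.singleton_append] at ih' ⊢
      simp only [ne_eq, decide_not] at ih'
      simp [ha, ih']
  · rintro ⟨hc, htw⟩
    have hne : ls.dropWhile (fun c => decide (c ≠ ':')) ≠ [] := by
      simp only [ne_eq, List.dropWhile_eq_nil_iff, not_forall]
      exact ⟨':', hc, by simp⟩
    have hhead : (ls.dropWhile (fun c => decide (c ≠ ':'))).head hne = ':' := by
      have := List.head_dropWhile_not (p := fun c => decide (c ≠ ':')) (l := ls) hne
      simpa using this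
    refine ⟨(ls.dropWhile (fun c => decide (c ≠ ':'))).tail, ?_⟩
    conv_rhs => rw [← List.takeWhile_append_dropWhile (p := fun c => decide (c ≠ ':')) (l := ls)]
    rw [htw, ← List.cons_head_tail hne, hhead]
    simp

lemma pv_sw_eq (ls p : List Char) (hp : ':' ∉ p) :
    PySem.Chars.startswith ls (p ++ [':']) =
      (decide (':' ∈ ls) && decide (ls.takeWhile (fun c => decide (c ≠ ':')) = p)) := by
  by_cases h : PySem.Chars.startswith ls (p ++ [':']) = true
  · obtain ⟨h1, h2⟩ := (pv_sw_iff ls p hp).1 h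
    simp only [ne_eq, decide_not] at h2
    simp [h, h1, h2]
  · have : ¬ (':' ∈ ls ∧ ls.takeWhile (fun c => decide (c ≠ ':')) = p) :=
      fun hc => h ((pv_sw_iff ls p hp).2 hc)
    rcases Decidable.not_and_iff_not_or_not.mp this with h' | h'
    · simp [Bool.eq_false_iff.mpr h, h']
    · simp only [ne_eq, decide_not] at h'
      simp [Bool.eq_false_iff.mpr h, h']

-- the whole comparison at the level of the lowered character list
lemma pv_key (ms : String) :
    (if pvAnyStarts ms ["ollama:", "together:", "groq:"] then false
     else if pvAnyStarts ms ["openai:", "anthropic:", "google:", "gemini:"] then true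
     else false) =
    (ms.toList.contains ':' && pvSupported.contains (ms.toList.takeWhile (fun c => decide (c ≠ ':')))) := by
  set ls := ms.toList with hls
  simp only [pvAnyStarts, PySem.Str.startswith_eq, ← hls]
  rw [show "ollama:".toList = "ollama".toList ++ [':'] from rfl,
      show "together:".toList = "together".toList ++ [':'] from rfl,
      show "groq:".toList = "groq".toList ++ [':'] from rfl,
      show "openai:".toList = "openai".toList ++ [':'] from rfl,
      show "anthropic:".toList = "anthropic".toList ++ [':'] from rfl,
      show "google:".toList = "google".toList ++ [':'] from rfl,
      show "gemini:".toList = "gemini".toList ++ [':'] from rfl]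
  rw [pv_sw_eq ls _ (by decide), pv_sw_eq ls _ (by decide), pv_sw_eq ls _ (by decide),
      pv_sw_eq ls _ (by decide), pv_sw_eq ls _ (by decide), pv_sw_eq ls _ (by decide),
      pv_sw_eq ls _ (by decide)]
  by_cases hc : ':' ∈ ls
  · have hcb : ls.contains ':' = true := by simpa using hc
    simp only [hc, decide_true, Bool.true_and, hcb, Bool.true_and]
    set t := ls.takeWhile (fun c => decide (c ≠ ':')) with ht
    by_cases h1 : t = "ollama".toList
    · simp [pvSupported, h1]
    by_cases h2 : t = "together".toList
    · simp [pvSupported, h2]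
    by_cases h3 : t = "groq".toList
    · simp [pvSupported, h3]
    by_cases h4 : t = "openai".toList
    · simp [pvSupported, h4]
    by_cases h5 : t = "anthropic".toList
    · simp [pvSupported, h5]
    by_cases h6 : t = "google".toList
    · simp [pvSupported, h6]
    by_cases h7 : t = "gemini".toList
    · simp [pvSupported, h7]
    simp [pvSupported, h1, h2, h3, h4, h5, h6, h7]
    intro hmem
    exfalso
    rcases hmem with h | h | h | h
    · exact h4 (h.trans (by decide))
    · exact h5 (h.trans (by decide))
    · exact h6 (h.trans (by decide))
    · exact h7 (h.trans (by decide))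
  · have hcb : ls.contains ':' = false := by simpa using hc
    simp [hc, hcb]

-- ===== VERDICT (by name: the statement is the Claim_ definition above) =====
theorem supports_structured_output_spec : Claim_equal_supports_structured_output := by
  intro model_name _
  unfold Spec_supports_structured_output supports_structured_output supports_structured_output_alt
  have h := pv_key (PySem.Str.lower model_name)
  simpa using h
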